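-- pv_equiv track=rewrite | github.com/camrankolahdouz/ticTacToe | ticTacToe.py | convertToBoard
-- ===== SOURCE A (Python) =====
-- def convertToBoard(N):
--     board = []
--     iteration = 0
--     while iteration < 9:
--         if N == 0:
--             board += [0]
--             iteration += 1
--             continue
--         x = N % 3
--         N //= 3
--         board += [x]
--         iteration += 1
--     return board
-- ===== SOURCE B (Python) =====
-- def convertToBoard(N):
--     # Digits depend only on N mod 3**9; extract them most-significant-first
--     # by greedy division by descending powers of 3, then reverse.
--     m = N % 19683  # 3**9
--     digits = []
--     for p in (6561, 2187, 729, 243, 81, 27, 9, 3, 1):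
--         d, m = divmod(m, p)
--         digits.append(d)
--     digits.reverse()
--     return digits
-- ===== Notes on version B (the rewrite author's own statement) =====
-- stated objective: alternative
-- what changed: Instead of A's least-significant-first loop threading a mutated quotient (N //= 3) with a special N==0 branch, B first normalizes N to m = N % 3**9 and extracts the digits most-significant-first by greedy divmod against descending powers of 3, building the list big-endian and reversing it at the end.
import Mathlib
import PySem

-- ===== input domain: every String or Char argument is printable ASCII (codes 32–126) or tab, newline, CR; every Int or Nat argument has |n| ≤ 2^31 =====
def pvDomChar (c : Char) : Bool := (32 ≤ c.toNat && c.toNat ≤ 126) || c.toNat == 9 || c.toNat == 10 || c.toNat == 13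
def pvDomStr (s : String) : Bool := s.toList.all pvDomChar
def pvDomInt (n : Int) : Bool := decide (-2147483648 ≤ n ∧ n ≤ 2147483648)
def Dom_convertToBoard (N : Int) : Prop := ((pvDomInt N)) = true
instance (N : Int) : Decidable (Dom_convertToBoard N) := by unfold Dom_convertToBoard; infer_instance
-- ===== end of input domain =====

-- B: normalizes to N % 3**9, then extracts digits most-significant-first by greedy divmod over descending powers of 3 and reverses (alternative decomposition).
-- ===== PORT A =====
-- while iteration < 9: fuel = 9 - iteration; state (N, board) as in A
def convertToBoardLoop : Nat → Int → List Int → List Int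
  | 0, _, board => board
  | k + 1, N, board =>
    if N == 0 then convertToBoardLoop k N (board ++ [0])
    else convertToBoardLoop k (PySem.Int.floordiv N 3) (board ++ [PySem.Int.mod N 3])

def convertToBoard (N : Int) : List Int := convertToBoardLoop 9 N []

-- ===== PORT B =====
-- the tuple of descending powers of 3 that Source B's for-loop iterates over
def bPowers : List Int := [6561, 2187, 729, 243, 81, 27, 9, 3, 1]

-- state (m, digits); divmod(m, p) = (m // p, m % p); digits.reverse() at the end
def convertToBoard_alt (N : Int) : List Int :=
  let m0 := PySem.Int.mod N 19683
  let r := bPowers.foldl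
    (fun (st : Int × List Int) p => (PySem.Int.mod st.1 p, st.2 ++ [PySem.Int.floordiv st.1 p]))
    (m0, [])
  r.2.reverse

-- ===== PRECONDITION & SPEC =====
def Spec_convertToBoard (N : Int) (out : List Int) : Prop := out = convertToBoard_alt N
instance (N : Int) (out : List Int) : Decidable (Spec_convertToBoard N out) := by unfold Spec_convertToBoard; infer_instance

-- ===== CLAIM (what is proved, stated in full; the proofs are below) =====
def Claim_equal_convertToBoard : Prop := ∀ (N : Int), Dom_convertToBoard N → Spec_convertToBoard N (convertToBoard N)

-- ===== LEMMAS AND PROOFS =====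

-- digit i of N//3 is digit i+1 of N (floor division composes)
theorem fdiv_three_pow (N : Int) (i : Nat) :
    PySem.Int.floordiv (PySem.Int.floordiv N 3) (3 ^ i) = PySem.Int.floordiv N (3 ^ (i + 1)) := by
  rw [PySem.Int.floordiv_eq_ediv_of_pos (by positivity),
      PySem.Int.floordiv_eq_ediv_of_pos (by norm_num),
      PySem.Int.floordiv_eq_ediv_of_pos (by positivity),
      Int.ediv_ediv_of_nonneg (by norm_num), pow_succ, mul_comm]

-- A's loop appends the base-3 digits of N least-significant-first
theorem loop_eq (k : Nat) : ∀ (N : Int) (acc : List Int),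
    convertToBoardLoop k N acc =
      acc ++ (List.range k).map (fun i => PySem.Int.mod (PySem.Int.floordiv N (3 ^ i)) 3) := by
  induction k with
  | zero => simp [convertToBoardLoop]
  | succ k ih =>
    intro N acc
    have step : ∀ M : Int, (List.range (k+1)).map
        (fun i => PySem.Int.mod (PySem.Int.floordiv M (3 ^ i)) 3)
        = PySem.Int.mod M 3 ::
          (List.range k).map (fun i => PySem.Int.mod (PySem.Int.floordiv (PySem.Int.floordiv M 3) (3 ^ i)) 3) := by
      intro M
      rw [List.range_succ_eq_map, List.map_cons, List.map_map]
      simp only [fdiv_three_pow]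
      congr 1
      simp [PySem.Int.floordiv]
    by_cases h : N = 0
    · subst h
      simp only [convertToBoardLoop, beq_self_eq_true, if_pos, ih]
      rw [step 0]
      simp
    · rw [show convertToBoardLoop (k+1) N acc
          = convertToBoardLoop k (PySem.Int.floordiv N 3) (acc ++ [PySem.Int.mod N 3]) by
        simp [convertToBoardLoop, h], ih, step N]
      simp

-- ===== VERDICT (by name: the statement is the Claim_ definition above) =====
theorem convertToBoard_spec : Claim_equal_convertToBoard := by
  intro N _
  unfold Spec_convertToBoard convertToBoard convertToBoard_alt bPowers
  rw [loop_eq]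
  simp only [List.foldl, List.range_succ, List.range_zero, List.map_cons,
    List.map_nil, List.nil_append, List.cons_append, List.reverse_cons, List.reverse_nil]
  norm_num [PySem.Int.floordiv_eq_ediv_of_pos, PySem.Int.mod_eq_emod_of_pos]
  omega
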